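-- pv_equiv track=rewrite | github.com/hhuzan/tda_tp_3 | greedy_pakku.py | greedy_pakku
-- ===== SOURCE A (Python) =====
-- def greedy_pakku(k, habilidades):
--     ordenadas = sorted([(v, i)
--                        for i, v in enumerate(habilidades)], reverse=True)
--     sumas = [0]*k
--     particion = [[] for _ in range(k)]
--     for valor, indice in ordenadas:
--         j = min(range(k), key=lambda x: sumas[x])
--         particion[j].append(indice)
--         sumas[j] += valor
--     return sum(s*s for s in sumas), particion
-- ===== SOURCE B (Python) =====
-- def _insertar(bins, e):
--     for pos, b in enumerate(bins):
--         if (e[0], e[1]) < (b[0], b[1]):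
--             return bins[:pos] + [e] + bins[pos:]
--     return bins + [e]
--
--
-- def greedy_pakku(k, habilidades):
--     orden = sorted([(v, i) for i, v in enumerate(habilidades)], reverse=True)
--     # bins kept ascending by (load, bin index); the lightest bin is always bins[0]
--     bins = [(0, j, []) for j in range(k)]
--     for valor, indice in orden:
--         s, j, items = bins[0]
--         bins = _insertar(bins[1:], (s + valor, j, items + [indice]))
--     total = sum(s * s for s, _, _ in bins)
--     particion = [[] for _ in range(k)]
--     for _, j, items in bins:
--         particion[j] = items
--     return total, particion
-- ===== Notes on version B (the rewrite author's own statement) =====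
-- stated objective: alternative
-- what changed: Instead of rescanning all k bin loads to find the argmin on every step, B keeps the bins in a list sorted by (load, index), always takes the head as the lightest bin and re-inserts it at its new ordered position, carrying each bin's member list inside the structure and rebuilding the partition at the end.
import Mathlib
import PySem

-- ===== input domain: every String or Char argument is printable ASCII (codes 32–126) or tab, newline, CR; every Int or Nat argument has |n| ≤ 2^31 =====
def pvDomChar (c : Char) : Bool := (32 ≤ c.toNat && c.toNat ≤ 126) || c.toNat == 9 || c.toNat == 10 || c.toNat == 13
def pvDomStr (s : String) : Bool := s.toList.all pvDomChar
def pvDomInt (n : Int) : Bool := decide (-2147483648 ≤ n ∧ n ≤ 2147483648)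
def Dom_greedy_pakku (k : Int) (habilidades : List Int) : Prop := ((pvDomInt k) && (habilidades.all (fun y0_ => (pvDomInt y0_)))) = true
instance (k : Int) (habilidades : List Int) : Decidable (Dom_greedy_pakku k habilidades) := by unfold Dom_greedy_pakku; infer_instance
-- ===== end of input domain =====

-- B replaces A's per-item argmin scan over all k bin loads by a bin list kept sorted by
-- (load, index) — head = lightest bin, ordered re-insertion — with each bin's member list
-- carried inside the structure and the partition rebuilt at the end (objective: alternative).

-- ===== PORT A =====
-- body of A's for-loop: j = min(range(k), key=lambda x: sumas[x]); particion[j].append(indice); sumas[j] += valor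
-- (the 'none' branch is unreachable under Pre_: Python's min raises ValueError on an empty range)
def pvStepA (k : Int) (st : List Int × List (List Int)) (vi : Int × Int) : List Int × List (List Int) :=
  match PySem.List.min? (PySem.List.pyRange 0 k 1) (fun x => PySem.List.pyGetD st.1 x 0) with
  | none => st
  | some j =>
      (st.1.set j.toNat (PySem.List.pyGetD st.1 j 0 + vi.1),
       st.2.set j.toNat (PySem.List.pyGetD st.2 j [] ++ [vi.2]))

def greedy_pakku (k : Int) (habilidades : List Int) : Int × List (List Int) :=
  let ordenadas := PySem.List.sorted2
    ((PySem.List.enumerate habilidades).map (fun p => (p.2, p.1))) (fun t => t.1) (fun t => t.2) true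
  let sumas : List Int := List.replicate k.toNat 0
  let particion : List (List Int) := List.replicate k.toNat []
  let st := ordenadas.foldl (pvStepA k) (sumas, particion)
  (st.1.foldl (fun a s => a + s * s) 0, st.2)

-- ===== PORT B =====
-- Python's tuple comparison (e0, e1) < (b0, b1) (lexicographic)
def pvTupLt (a b : Int × Int) : Bool := a.1 < b.1 || (a.1 == b.1 && a.2 < b.2)

-- _insertar: insert e into the (load, index)-sorted list, before the first larger entry
def pvInsertar (bins : List (Int × Int × List Int)) (e : Int × Int × List Int) :
    List (Int × Int × List Int) :=
  match bins with
  | [] => [e]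
  | b :: rest => if pvTupLt (e.1, e.2.1) (b.1, b.2.1) then e :: b :: rest else b :: pvInsertar rest e

-- body of B's for-loop: pop the head (lightest bin), re-insert it updated
-- (the '[]' branch is unreachable under Pre_: Python's bins[0] raises IndexError there)
def pvStepB (bins : List (Int × Int × List Int)) (vi : Int × Int) : List (Int × Int × List Int) :=
  match bins with
  | [] => []
  | (s, j, items) :: rest => pvInsertar rest (s + vi.1, j, items ++ [vi.2])

def greedy_pakku_alt (k : Int) (habilidades : List Int) : Int × List (List Int) :=
  let orden := PySem.List.sorted2
    ((PySem.List.enumerate habilidades).map (fun p => (p.2, p.1))) (fun t => t.1) (fun t => t.2) true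
  let bins0 : List (Int × Int × List Int) := (PySem.List.pyRange 0 k 1).map (fun j => (0, j, []))
  let bins := orden.foldl pvStepB bins0
  let total := bins.foldl (fun a e => a + e.1 * e.1) 0
  let particion := bins.foldl (fun (p : List (List Int)) e => p.set e.2.1.toNat e.2.2)
    (List.replicate k.toNat [])
  (total, particion)

-- ===== PRECONDITION & SPEC =====
-- Pre_ excludes only the inputs where the Python programs raise: k ≤ 0 with a nonempty
-- habilidades makes A's min(range(k)) raise ValueError (and B's bins[0] an IndexError).
def Pre_greedy_pakku (k : Int) (habilidades : List Int) : Prop := 0 < k ∨ habilidades = []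
instance (k : Int) (habilidades : List Int) : Decidable (Pre_greedy_pakku k habilidades) := by
  unfold Pre_greedy_pakku; infer_instance
def pvWitness_greedy_pakku : Int × List Int := (2, [3, 1, 2])

def Spec_greedy_pakku (k : Int) (habilidades : List Int) (out : Int × List (List Int)) : Prop :=
  out = greedy_pakku_alt k habilidades
instance (k : Int) (habilidades : List Int) (out : Int × List (List Int)) :
    Decidable (Spec_greedy_pakku k habilidades out) := by unfold Spec_greedy_pakku; infer_instance

-- ===== CLAIM (what is proved, stated in full; the proofs are below) =====
def Claim_equal_greedy_pakku : Prop := ∀ (k : Int) (habilidades : List Int),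
  Dom_greedy_pakku k habilidades → Pre_greedy_pakku k habilidades →
  Spec_greedy_pakku k habilidades (greedy_pakku k habilidades)

-- ===== LEMMAS AND PROOFS =====

-- the abstract bin entry a state (sums, part) of A induces at index j
def pvEnt (sums : List Int) (part : List (List Int)) (j : Nat) : Int × Int × List Int :=
  (sums.getD j 0, (j : Int), part.getD j [])

def pvModel (sums : List Int) (part : List (List Int)) (k' : Nat) : List (Int × Int × List Int) :=
  (List.range k').map (pvEnt sums part)

-- strict lexicographic order on (load, index) of entries
def pvLt (a b : Int × Int × List Int) : Prop := a.1 < b.1 ∨ (a.1 = b.1 ∧ a.2.1 < b.2.1)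

-- loop invariant: B's bins are exactly A's bins, sorted by (load, index)
def pvInv (k' : Nat) (st : List Int × List (List Int)) (bins : List (Int × Int × List Int)) : Prop :=
  st.1.length = k' ∧ st.2.length = k' ∧ bins.Perm (pvModel st.1 st.2 k') ∧ bins.Pairwise pvLt

theorem pvTupLt_iff (a b : Int × Int × List Int) :
    pvTupLt (a.1, a.2.1) (b.1, b.2.1) = true ↔ pvLt a b := by
  simp [pvTupLt, pvLt]

theorem pvLt_trans {a b c : Int × Int × List Int} (h1 : pvLt a b) (h2 : pvLt b c) : pvLt a c := by
  unfold pvLt at *; omega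

theorem pvLt_total {a b : Int × Int × List Int} (h : ¬ pvLt a b) (hne : a.2.1 ≠ b.2.1) :
    pvLt b a := by
  unfold pvLt at *
  rcases lt_trichotomy a.1 b.1 with h1 | h1 | h1
  · exact absurd (Or.inl h1) h
  · rcases lt_trichotomy a.2.1 b.2.1 with h2 | h2 | h2
    · exact absurd (Or.inr ⟨h1, h2⟩) h
    · exact absurd h2 hne
    · exact Or.inr ⟨h1.symm, h2⟩
  · exact Or.inl h1

theorem pvInsertar_perm (l : List (Int × Int × List Int)) (e : Int × Int × List Int) :
    (pvInsertar l e).Perm (e :: l) := by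
  induction l with
  | nil => simp [pvInsertar]
  | cons b rest ih =>
      unfold pvInsertar
      split
      · exact List.Perm.refl _
      · exact (ih.cons b).trans (List.Perm.swap e b rest)

theorem pvInsertar_pairwise {l : List (Int × Int × List Int)} {e : Int × Int × List Int}
    (hl : l.Pairwise pvLt) (hk : ∀ b ∈ l, e.2.1 ≠ b.2.1) :
    (pvInsertar l e).Pairwise pvLt := by
  induction l with
  | nil => simp [pvInsertar]
  | cons b rest ih =>
      unfold pvInsertar
      rcases List.pairwise_cons.mp hl with ⟨hb, hrest⟩
      split
      · rename_i hlt
        rw [pvTupLt_iff] at hlt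
        refine List.pairwise_cons.mpr ⟨?_, hl⟩
        intro y hy
        rcases List.mem_cons.mp hy with rfl | hy
        · exact hlt
        · exact pvLt_trans hlt (hb _ hy)
      · rename_i hnlt
        rw [pvTupLt_iff] at hnlt
        refine List.pairwise_cons.mpr ⟨?_, ih hrest (fun c hc => hk c (by simp [hc]))⟩
        intro y hy
        have hy' : y = e ∨ y ∈ rest := by
          have := (pvInsertar_perm rest e).mem_iff.mp hy
          simpa using this
        rcases hy' with rfl | hy'
        · exact pvLt_total hnlt (hk b (by simp))
        · exact hb _ hy'

-- the fold inside Python's min(xs, key=...) (first minimal element wins)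
def pvMinStep (key : Int → Int) (acc : Option Int) (x : Int) : Option Int :=
  match acc with
  | none => some x
  | some m => if key x < key m then some x else some m

theorem pvMin?_eq (key : Int → Int) (xs : List Int) :
    PySem.List.min? xs key = xs.foldl (pvMinStep key) none := by
  unfold PySem.List.min? pvMinStep
  congr 1
  funext acc x
  cases acc <;> rfl

-- min with key over a strictly increasing list is lexicographically minimal in (key, value)
theorem pvMinFold_lex (key : Int → Int) (t : List Int) : ∀ a : Int,
    (∀ y ∈ t, a < y) → t.Pairwise (· < ·) →
    ∃ m, t.foldl (pvMinStep key) (some a) = some m ∧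
      (m = a ∨ m ∈ t) ∧
      (key m < key a ∨ m = a) ∧
      (∀ y ∈ t, key m < key y ∨ (key m = key y ∧ m ≤ y)) := by
  induction t with
  | nil => intro a _ _; exact ⟨a, rfl, Or.inl rfl, Or.inr rfl, by simp⟩
  | cons y t' ih =>
      intro a ha hp
      rcases List.pairwise_cons.mp hp with ⟨hy, hp'⟩
      by_cases hlt : key y < key a
      · obtain ⟨m, hm, hmem, hma, hmt⟩ := ih y hy hp'
        refine ⟨m, by simpa [pvMinStep, hlt] using hm, ?_, ?_, ?_⟩
        · rcases hmem with rfl | hmem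
          · exact Or.inr (by simp)
          · exact Or.inr (by simp [hmem])
        · left
          rcases hma with h | rfl
          · omega
          · exact hlt
        · intro z hz
          rcases List.mem_cons.mp hz with rfl | hz
          · rcases hma with h | rfl
            · exact Or.inl h
            · exact Or.inr ⟨rfl, le_refl _⟩
          · exact hmt z hz
      · obtain ⟨m, hm, hmem, hma, hmt⟩ := ih a (fun z hz => ha z (by simp [hz])) hp'
        refine ⟨m, by simpa [pvMinStep, hlt] using hm, ?_, hma, ?_⟩
        · rcases hmem with rfl | hmem
          · exact Or.inl rfl
          · exact Or.inr (by simp [hmem])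
        · intro z hz
          rcases List.mem_cons.mp hz with rfl | hz
          · rcases hma with h | rfl
            · left; omega
            · by_cases he : key m = key z
              · exact Or.inr ⟨he, le_of_lt (ha z (by simp))⟩
              · left; omega
          · exact hmt z hz

-- characterisation of A's j = min(range(k), key=lambda x: sumas[x])
theorem pvArgmin (k : Int) (hk : 0 < k) (key : Int → Int) :
    ∃ j, PySem.List.min? (PySem.List.pyRange 0 k 1) key = some j ∧ 0 ≤ j ∧ j < k ∧
      (∀ y, 0 ≤ y → y < k → key j < key y ∨ (key j = key y ∧ j ≤ y)) := by
  have hcons := PySem.List.pyRange_one_cons (a := 0) (b := k) hk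
  have hmem : ∀ y ∈ PySem.List.pyRange (0+1) k 1, (0:Int) < y := by
    intro y hy
    have := (PySem.List.mem_pyRange_one).mp hy
    omega
  have hpair : (PySem.List.pyRange (0+1) k 1).Pairwise (· < ·) :=
    PySem.List.pairwise_lt_pyRange_one _ _
  obtain ⟨m, hm, hmem', hma, hmt⟩ := pvMinFold_lex key (PySem.List.pyRange (0+1) k 1) 0 hmem hpair
  have hbounds : 0 ≤ m ∧ m < k := by
    rcases hmem' with rfl | hmem'
    · omega
    · have := (PySem.List.mem_pyRange_one).mp hmem'
      omega
  refine ⟨m, ?_, hbounds.1, hbounds.2, ?_⟩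
  · rw [pvMin?_eq, hcons]
    simpa [pvMinStep] using hm
  · intro y hy0 hyk
    by_cases hy : y = 0
    · subst hy
      rcases hma with h | rfl
      · exact Or.inl h
      · exact Or.inr ⟨rfl, le_refl _⟩
    · exact hmt y ((PySem.List.mem_pyRange_one).mpr (by omega))


theorem pvGetD_set_self {α : Type} (l : List α) (n : Nat) (a d : α) (h : n < l.length) :
    (l.set n a).getD n d = a := by simp [List.getD, h]

theorem pvGetD_set_ne {α : Type} (l : List α) (n m : Nat) (a d : α) (h : n ≠ m) :
    (l.set n a).getD m d = l.getD m d := by simp [List.getD, List.getElem?_set_ne h]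

theorem pvRangeSplit (j k : Nat) (h : j < k) :
    List.range k = List.range j ++ j :: (List.range (k - j - 1)).map (fun i => j + 1 + i) := by
  rw [show k = j + (1 + (k - j - 1)) by omega, List.range_add, List.range_add]
  simp [List.map_map, Function.comp_def]
  intro a _
  omega

theorem pvModel_shape {sums : List Int} {part : List (List Int)} {k' : Nat}
    {x : Int × Int × List Int} (h : x ∈ pvModel sums part k') :
    ∃ i, i < k' ∧ x = pvEnt sums part i := by
  simp only [pvModel, List.mem_map, List.mem_range] at h
  obtain ⟨i, hi, rfl⟩ := h
  exact ⟨i, hi, rfl⟩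

theorem pvModel_mem {sums : List Int} {part : List (List Int)} {k' : Nat} {i : Nat}
    (h : i < k') : pvEnt sums part i ∈ pvModel sums part k' := by
  simp only [pvModel, List.mem_map, List.mem_range]
  exact ⟨i, h, rfl⟩

theorem pvModel_nodup (sums : List Int) (part : List (List Int)) (k' : Nat) :
    (pvModel sums part k').Nodup := by
  refine List.nodup_range.map_on ?_
  intro i _ i' _ he
  have := congrArg (fun t => t.2.1) he
  simpa [pvEnt] using this

-- one loop iteration preserves the invariant
theorem pvStep_inv (k : Int) (hk : 0 < k) (st : List Int × List (List Int))
    (bins : List (Int × Int × List Int)) (vi : Int × Int)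
    (h : pvInv k.toNat st bins) : pvInv k.toNat (pvStepA k st vi) (pvStepB bins vi) := by
  obtain ⟨hls, hlp, hperm, hsort⟩ := h
  obtain ⟨j, hmin, hj0, hjk, hlex⟩ := pvArgmin k hk (fun x => PySem.List.pyGetD st.1 x 0)
  have hjcast : ((j.toNat : Int)) = j := Int.toNat_of_nonneg hj0
  have hjk' : j.toNat < k.toNat := by omega
  have hkey : ∀ {α : Type} (xs : List α) (d : α), PySem.List.pyGetD xs j d = xs.getD j.toNat d := by
    intro α xs d
    rw [← hjcast, PySem.List.pyGetD_natCast, Int.toNat_natCast]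
  have hA : pvStepA k st vi =
      (st.1.set j.toNat (st.1.getD j.toNat 0 + vi.1),
       st.2.set j.toNat (st.2.getD j.toNat [] ++ [vi.2])) := by
    unfold pvStepA
    rw [hmin]
    dsimp only
    rw [hkey, hkey]
  have hlen : bins.length = k.toNat := by
    rw [hperm.length_eq]
    simp [pvModel]
  match bins, hperm, hsort, hlen with
  | [], hperm, hsort, hlen => exact absurd hlen (by simp; omega)
  | h0 :: rest, hperm, hsort, hlen => ?_
  have hold_mem : pvEnt st.1 st.2 j.toNat ∈ h0 :: rest := hperm.mem_iff.mpr (pvModel_mem hjk')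
  -- the head of B's sorted bins is exactly the bin A's argmin picks
  have hh0 : h0 = pvEnt st.1 st.2 j.toNat := by
    rcases List.mem_cons.mp hold_mem with h | h
    · exact h.symm
    · exfalso
      have hlt : pvLt h0 (pvEnt st.1 st.2 j.toNat) := (List.pairwise_cons.mp hsort).1 _ h
      obtain ⟨i, hik, rfl⟩ := pvModel_shape (hperm.mem_iff.mp (List.mem_cons_self))
      have hcmp := hlex (i : Int) (Int.natCast_nonneg i) (by omega)
      rw [hkey] at hcmp
      rw [PySem.List.pyGetD_natCast] at hcmp
      simp only [pvLt, pvEnt] at hlt hcmp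
      omega
  -- B's step
  have hB : pvStepB (h0 :: rest) vi =
      pvInsertar rest (st.1.getD j.toNat 0 + vi.1, (j.toNat : Int), st.2.getD j.toNat [] ++ [vi.2]) := by
    rw [hh0]
    rfl
  have hnew : pvEnt (pvStepA k st vi).1 (pvStepA k st vi).2 j.toNat =
      (st.1.getD j.toNat 0 + vi.1, (j.toNat : Int), st.2.getD j.toNat [] ++ [vi.2]) := by
    rw [hA]
    simp only [pvEnt]
    rw [pvGetD_set_self _ _ _ _ (by omega), pvGetD_set_self _ _ _ _ (by omega)]
  have hent_eq : ∀ i : Nat, i ≠ j.toNat →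
      pvEnt (pvStepA k st vi).1 (pvStepA k st vi).2 i = pvEnt st.1 st.2 i := by
    intro i hi
    rw [hA]
    simp only [pvEnt]
    rw [pvGetD_set_ne _ _ _ _ _ (fun e => hi e.symm), pvGetD_set_ne _ _ _ _ _ (fun e => hi e.symm)]
  have hsplit := pvRangeSplit j.toNat k.toNat hjk'
  have hmodel : pvModel st.1 st.2 k.toNat =
      (List.range j.toNat).map (pvEnt st.1 st.2) ++ pvEnt st.1 st.2 j.toNat ::
        (List.range (k.toNat - j.toNat - 1)).map (fun i => pvEnt st.1 st.2 (j.toNat + 1 + i)) := by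
    rw [pvModel, hsplit]
    simp [List.map_map, Function.comp_def]
  have hmodel' : pvModel (pvStepA k st vi).1 (pvStepA k st vi).2 k.toNat =
      (List.range j.toNat).map (pvEnt st.1 st.2) ++
        (st.1.getD j.toNat 0 + vi.1, (j.toNat : Int), st.2.getD j.toNat [] ++ [vi.2]) ::
        (List.range (k.toNat - j.toNat - 1)).map (fun i => pvEnt st.1 st.2 (j.toNat + 1 + i)) := by
    rw [pvModel, hsplit, List.map_append, List.map_cons, List.map_map]
    rw [hnew]
    congr 1
    · exact List.map_congr_left (fun i hi => hent_eq i (by simp at hi; omega))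
    · congr 1
      exact List.map_congr_left (fun i _ => hent_eq (j.toNat + 1 + i) (by omega))
  have hnotin : pvEnt st.1 st.2 j.toNat ∉ (List.range j.toNat).map (pvEnt st.1 st.2) := by
    intro hmem
    simp only [List.mem_map, List.mem_range] at hmem
    obtain ⟨i, hi, he⟩ := hmem
    have := congrArg (fun t => t.2.1) he
    simp only [pvEnt] at this
    omega
  have hrest : rest.Perm ((pvModel st.1 st.2 k.toNat).erase (pvEnt st.1 st.2 j.toNat)) := by
    have hp : List.Perm ((pvEnt st.1 st.2 j.toNat) :: rest) (pvModel st.1 st.2 k.toNat) :=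
      hh0 ▸ hperm
    exact (List.cons_perm_iff_perm_erase.mp hp).2
  have herase : (pvModel st.1 st.2 k.toNat).erase (pvEnt st.1 st.2 j.toNat) =
      (List.range j.toNat).map (pvEnt st.1 st.2) ++
        (List.range (k.toNat - j.toNat - 1)).map (fun i => pvEnt st.1 st.2 (j.toNat + 1 + i)) := by
    rw [hmodel, List.erase_append_right _ hnotin, List.erase_cons_head]
  have hkeys : ∀ b ∈ rest,
      (st.1.getD j.toNat 0 + vi.1, ((j.toNat : Int)), st.2.getD j.toNat [] ++ [vi.2]).2.1 ≠ b.2.1 := by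
    intro b hb
    have hb' : b ∈ (List.range j.toNat).map (pvEnt st.1 st.2) ++
        (List.range (k.toNat - j.toNat - 1)).map (fun i => pvEnt st.1 st.2 (j.toNat + 1 + i)) := by
      rw [← herase]
      exact hrest.mem_iff.mp hb
    rcases List.mem_append.mp hb' with hm | hm <;>
    · simp only [List.mem_map, List.mem_range] at hm
      obtain ⟨i, hi, rfl⟩ := hm
      simp only [pvEnt]
      intro he
      omega
  refine ⟨?_, ?_, ?_, ?_⟩
  · rw [hA]; simpa using hls
  · rw [hA]; simpa using hlp
  · rw [hB]
    refine ((pvInsertar_perm _ _).trans ?_)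
    rw [hmodel']
    refine List.Perm.trans ?_ List.perm_middle.symm
    exact List.Perm.cons _ (hrest.trans (by rw [herase]))
  · rw [hB]
    exact pvInsertar_pairwise (List.pairwise_cons.mp hsort).2 hkeys

theorem pvFold_inv (k : Int) (hk : 0 < k) (l : List (Int × Int)) :
    ∀ st bins, pvInv k.toNat st bins →
      pvInv k.toNat (l.foldl (pvStepA k) st) (l.foldl pvStepB bins) := by
  induction l with
  | nil => intro st bins h; exact h
  | cons vi l ih => intro st bins h; exact ih _ _ (pvStep_inv k hk st bins vi h)

theorem pvInit_inv (k : Int) :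
    pvInv k.toNat (List.replicate k.toNat 0, List.replicate k.toNat [])
      ((PySem.List.pyRange 0 k 1).map (fun j => (0, j, []))) := by
  have hbins : (PySem.List.pyRange 0 k 1).map (fun j => ((0:Int), j, ([]:List Int))) =
      pvModel (List.replicate k.toNat 0) (List.replicate k.toNat []) k.toNat := by
    rw [PySem.List.pyRange_one, pvModel]
    simp [List.map_map, Function.comp_def, pvEnt, List.getD, List.getElem?_replicate]
    intro a ha
    simp [ha]
  refine ⟨by simp, by simp, by rw [hbins], ?_⟩
  refine List.pairwise_map.mpr ?_
  exact (PySem.List.pairwise_lt_pyRange_one _ _).imp (fun h => Or.inr ⟨rfl, h⟩)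

theorem pvFoldlAdd {α : Type} (f : α → Int) (l : List α) : ∀ c : Int,
    l.foldl (fun a x => a + f x) c = c + (l.map f).sum := by
  induction l with
  | nil => intro c; simp
  | cons x l ih => intro c; simp [ih, add_assoc]

theorem pvGetDRange {α : Type} (xs : List α) (d : α) :
    (List.range xs.length).map (fun i => xs.getD i d) = xs := by
  refine List.ext_getElem (by simp) ?_
  intro i h1 h2
  simp [List.getD, List.getElem?_eq_getElem h2]

theorem pvFoldlSet_length (es : List (Int × Int × List Int)) : ∀ init : List (List Int),
    (es.foldl (fun (p : List (List Int)) e => p.set e.2.1.toNat e.2.2) init).length =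
      init.length := by
  induction es with
  | nil => intro init; rfl
  | cons e es ih => intro init; simp [ih]

theorem pvFoldlSet_other (es : List (Int × Int × List Int)) : ∀ (init : List (List Int)) (i : Nat),
    (∀ e ∈ es, e.2.1.toNat ≠ i) →
    (es.foldl (fun (p : List (List Int)) e => p.set e.2.1.toNat e.2.2) init).getD i [] =
      init.getD i [] := by
  induction es with
  | nil => intro init i _; rfl
  | cons e es ih =>
      intro init i hne
      simp only [List.foldl_cons]
      rw [ih _ _ (fun e' he' => hne e' (by simp [he']))]
      exact pvGetD_set_ne _ _ _ _ _ (hne e (by simp))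

theorem pvFoldlSet_hit (es : List (Int × Int × List Int)) :
    ∀ (init : List (List Int)) (i : Nat) (e : Int × Int × List Int),
    e ∈ es → e.2.1.toNat = i → i < init.length →
    (∀ e' ∈ es, e'.2.1.toNat = i → e' = e) → es.Nodup →
    (es.foldl (fun (p : List (List Int)) e => p.set e.2.1.toNat e.2.2) init).getD i [] =
      e.2.2 := by
  induction es with
  | nil => intro _ _ _ h; simp at h
  | cons a es ih =>
      intro init i e hmem hpos hlt huniq hnd
      simp only [List.foldl_cons]
      by_cases ha : a = e
      · subst ha
        subst hpos
        rw [pvFoldlSet_other]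
        · exact pvGetD_set_self _ _ _ _ hlt
        · intro e' he' hpi
          have : e' = a := huniq e' (by simp [he']) hpi
          exact absurd (this ▸ he') (List.nodup_cons.mp hnd).1
      · have hane : a.2.1.toNat ≠ i := fun hpi => ha (huniq a (by simp) hpi)
        refine ih _ _ e ?_ hpos (by simpa using hlt) ?_ (List.nodup_cons.mp hnd).2
        · rcases List.mem_cons.mp hmem with rfl | hm
          · exact absurd rfl ha
          · exact hm
        · intro e' he' hpi
          exact huniq e' (by simp [he']) hpi
-- the two returned components, extracted from the invariant at the end of the loop
theorem pvTotal_eq (k' : Nat) (st : List Int × List (List Int))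
    (bins : List (Int × Int × List Int)) (h : pvInv k' st bins) :
    bins.foldl (fun a e => a + e.1 * e.1) 0 = st.1.foldl (fun a s => a + s * s) 0 := by
  obtain ⟨h1, _, hperm, _⟩ := h
  rw [pvFoldlAdd (fun e => e.1 * e.1) bins 0, pvFoldlAdd (fun s => s * s) st.1 0]
  have hpm := (hperm.map (fun e : Int × Int × List Int => e.1 * e.1)).sum_eq
  rw [hpm]
  conv_rhs => rw [← pvGetDRange st.1 0]
  rw [h1]
  simp [pvModel, List.map_map, Function.comp_def, pvEnt]

theorem pvPart_eq (k' : Nat) (st : List Int × List (List Int))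
    (bins : List (Int × Int × List Int)) (h : pvInv k' st bins) :
    bins.foldl (fun (p : List (List Int)) e => p.set e.2.1.toNat e.2.2)
      (List.replicate k' []) = st.2 := by
  obtain ⟨_, h2, hperm, _⟩ := h
  refine List.ext_getElem (by rw [pvFoldlSet_length]; simp [h2]) ?_
  intro i hi1 hi2
  have hik : i < k' := h2 ▸ hi2
  have hhit := pvFoldlSet_hit bins (List.replicate k' []) i (pvEnt st.1 st.2 i)
    (hperm.mem_iff.mpr (pvModel_mem hik))
    (by simp [pvEnt])
    (by simpa using hik)
    (by
      intro e' he' hpi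
      obtain ⟨i', _, rfl⟩ := pvModel_shape (hperm.mem_iff.mp he')
      have : i' = i := by simpa [pvEnt] using hpi
      rw [this])
    (hperm.nodup_iff.mpr (pvModel_nodup st.1 st.2 k'))
  rw [← List.getD_eq_getElem _ ([] : List Int) hi1, hhit]
  simp [pvEnt, List.getD, List.getElem?_eq_getElem hi2]

theorem greedy_pakku_spec : Claim_equal_greedy_pakku := by
  intro k hab _ hpre
  unfold Spec_greedy_pakku greedy_pakku greedy_pakku_alt
  by_cases hk : 0 < k
  · have hinv := pvFold_inv k hk
      (PySem.List.sorted2 ((PySem.List.enumerate hab).map (fun p => (p.2, p.1)))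
        (fun t => t.1) (fun t => t.2) true)
      (List.replicate k.toNat 0, List.replicate k.toNat [])
      ((PySem.List.pyRange 0 k 1).map (fun j => (0, j, [])))
      (pvInit_inv k)
    simp only [Prod.mk.injEq]
    exact ⟨(pvTotal_eq _ _ _ hinv).symm, (pvPart_eq _ _ _ hinv).symm⟩
  · rcases hpre with h | rfl
    · omega
    · have hk0 : k.toNat = 0 := by omega
      have hr : PySem.List.pyRange 0 k 1 = [] := PySem.List.pyRange_one_eq_nil (by omega)
      simp [hk0, hr, PySem.List.enumerate, PySem.List.sorted2]
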